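-- pv_equiv track=rewrite | github.com/dhoso/auto_composer | main.py | build_chord_graph
-- ===== SOURCE A (Python) =====
-- def build_chord_graph(chords_lists):
--     chord_graph = {}
--
--     for chords in chords_lists:
--         pre_chord = None
--         for chord in chords:
--             if pre_chord not in chord_graph:
--                 chord_graph[pre_chord] = {}
--
--             if chord[1] not in chord_graph[pre_chord]:
--                 chord_graph[pre_chord][chord[1]] = 0
--
--             chord_graph[pre_chord][chord[1]] += 1
--
--             pre_chord = chord[1]
--     return chord_graph
-- ===== SOURCE B (Python) =====
-- def build_chord_graph(chords_lists):
--     # Declarative group-by: list all (pre, next) transitions, then build the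
--     # nested dict by querying that list (dedup for keys, count for values),
--     # with no incremental dict mutation at all.
--     trans = [p
--              for chords in chords_lists
--              for p in zip([None] + [c[1] for c in chords],
--                           [c[1] for c in chords])]
--
--     def dedup(xs):
--         return list(dict.fromkeys(xs))
--
--     return {a: {b: succs.count(b) for b in dedup(succs)}
--             for a in dedup(p[0] for p in trans)
--             for succs in [[p[1] for p in trans if p[0] == a]]}
-- ===== Notes on version B (the rewrite author's own statement) =====
-- stated objective: alternative
-- what changed: B replaces A's single-pass incremental nested-dict counting with a declarative group-by: it materialises the list of all (pre, next) transitions, then builds the result purely by querying that list - dedup for the outer and inner key orders and list.count for each frequency - with no dict mutation at all.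
import Mathlib
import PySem

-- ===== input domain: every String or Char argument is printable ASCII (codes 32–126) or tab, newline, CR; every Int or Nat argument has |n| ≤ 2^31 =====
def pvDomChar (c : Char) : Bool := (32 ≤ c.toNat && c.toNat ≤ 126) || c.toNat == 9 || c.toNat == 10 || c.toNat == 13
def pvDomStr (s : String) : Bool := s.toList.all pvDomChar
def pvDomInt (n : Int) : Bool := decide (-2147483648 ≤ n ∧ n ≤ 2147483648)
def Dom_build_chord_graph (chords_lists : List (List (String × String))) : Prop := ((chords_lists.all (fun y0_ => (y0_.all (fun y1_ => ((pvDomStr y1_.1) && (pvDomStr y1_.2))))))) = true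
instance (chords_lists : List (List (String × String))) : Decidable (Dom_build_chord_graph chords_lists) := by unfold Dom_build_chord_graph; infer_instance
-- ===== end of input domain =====

-- B replaces A's single-pass incremental nested-dict counting with a declarative group-by:
-- it lists every (pre, next) transition, then builds the result by querying that list
-- (dedup for the keys, list.count for each value), with no dict mutation at all
-- (objective: alternative; B does more work per distinct key, not claimed faster).

-- ===== PORT A =====
-- Body of A's inner loop: g is the nested dict, p = (pre_chord, chord[1]).
def pvStepA (g : PySem.Dict (Option String) (PySem.Dict String Int))
    (p : Option String × String) : PySem.Dict (Option String) (PySem.Dict String Int) :=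
  let g1 := if g.contains p.1 then g else g.insert p.1 PySem.Dict.empty
  let g2 := if (g1.getD p.1 PySem.Dict.empty).contains p.2 then g1
            else g1.insert p.1 ((g1.getD p.1 PySem.Dict.empty).insert p.2 0)
  g2.insert p.1 ((g2.getD p.1 PySem.Dict.empty).insert p.2
    ((g2.getD p.1 PySem.Dict.empty).getD p.2 0 + 1))

def build_chord_graph (chords_lists : List (List (String × String))) : List (Option String × List (String × Int)) :=
  let g := chords_lists.foldl (fun g chords =>
    (chords.foldl (fun st chord => (pvStepA st.1 (st.2, chord.2), some chord.2))
      (g, (none : Option String))).1) PySem.Dict.empty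
  g.items.map (fun p => (p.1, p.2.items))

-- ===== PORT B =====
def build_chord_graph_alt (chords_lists : List (List (String × String))) : List (Option String × List (String × Int)) :=
  -- trans = all (pre, next) pairs: zip([None] + [c[1] for c in chords], [c[1] for c in chords])
  let trans : List (Option String × String) := chords_lists.flatMap (fun chords =>
    let nexts : List String := chords.map (fun c => c.2)
    ((none :: nexts.map some).zip nexts))
  -- {a: {b: succs.count(b) for b in dedup(succs)} for a in dedup(...) for succs in [...]}
  let graph := PySem.Dict.mk ((PySem.List.dedup (trans.map (fun p => p.1))).map (fun a =>
    let succs : List String := (trans.filter (fun p => p.1 == a)).map (fun p => p.2)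
    (a, PySem.Dict.mk ((PySem.List.dedup succs).map (fun b => (b, (PySem.List.count succs b : Int)))))))
  graph.items.map (fun p => (p.1, p.2.items))

-- ===== PRECONDITION & SPEC =====
def Spec_build_chord_graph (chords_lists : List (List (String × String))) (out : List (Option String × List (String × Int))) : Prop := out = build_chord_graph_alt chords_lists
instance (chords_lists : List (List (String × String))) (out : List (Option String × List (String × Int))) : Decidable (Spec_build_chord_graph chords_lists out) := by unfold Spec_build_chord_graph; infer_instance

-- ===== CLAIM (what is proved, stated in full; the proofs are below) =====
def Claim_equal_build_chord_graph : Prop := ∀ (chords_lists : List (List (String × String))), Dom_build_chord_graph chords_lists → Spec_build_chord_graph chords_lists (build_chord_graph chords_lists)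

-- ===== LEMMAS AND PROOFS =====

-- the list of (pre, next) transitions of one chord list, starting from pre
def pvTrans (pre : Option String) : List (String × String) → List (Option String × String)
  | [] => []
  | c :: cs => (pre, c.2) :: pvTrans (some c.2) cs

-- the nested dict both programs build, in closed form
def pvGrouped (ps : List (Option String × String)) : PySem.Dict (Option String) (PySem.Dict String Int) :=
  PySem.Dict.mk ((PySem.Set.ofList (ps.map (·.1))).map (fun a =>
    (a, PySem.Dict.counter ((ps.filter (fun q => q.1 == a)).map (·.2)))))

-- A's inner loop is a fold of pvStepA over the transitions
theorem pvA_flatten (chords : List (String × String)) :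
    ∀ (g : PySem.Dict (Option String) (PySem.Dict String Int)) (pre : Option String),
    (chords.foldl (fun st chord => (pvStepA st.1 (st.2, chord.2), some chord.2)) (g, pre)).1
      = (pvTrans pre chords).foldl pvStepA g := by
  induction chords with
  | nil => intro g pre; rfl
  | cons c cs ih =>
      intro g pre
      simp only [List.foldl_cons, pvTrans]
      exact ih _ _

-- B's zip produces the transitions
theorem pvB_zip (chords : List (String × String)) : ∀ (pre : Option String),
    ((pre :: (chords.map (fun c => c.2)).map some).zip (chords.map (fun c => c.2)))
      = pvTrans pre chords := by
  induction chords with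
  | nil => intro pre; rfl
  | cons c cs ih =>
      intro pre
      simp only [List.map_cons, List.zip_cons_cons, pvTrans]
      exact congrArg _ (ih (some c.2))

-- ensure-then-increment = counter extended by one element
theorem pvEnsureBump (S : List String) (b : String) :
    (if (PySem.Dict.counter S).contains b then PySem.Dict.counter S
     else (PySem.Dict.counter S).insert b (0 : Int)).insert b
      ((if (PySem.Dict.counter S).contains b then PySem.Dict.counter S
        else (PySem.Dict.counter S).insert b (0 : Int)).getD b 0 + 1)
      = PySem.Dict.counter (S ++ [b]) := by
  rw [← PySem.Dict.foldl_insert_getD_add_one_eq_counter (S ++ [b]), List.foldl_append,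
    PySem.Dict.foldl_insert_getD_add_one_eq_counter]
  simp only [List.foldl_cons, List.foldl_nil]
  by_cases h : (PySem.Dict.counter S).contains b
  · simp only [h, if_true]
  · simp only [Bool.not_eq_true] at h
    simp only [h, Bool.false_eq_true, if_false, PySem.Dict.getD_insert_self,
      PySem.Dict.insert_insert_self, PySem.Dict.getD_of_not_contains _ _ h]

-- pvStepA, with the two writes to the outer dict merged into one
theorem pvStepA_eq (g : PySem.Dict (Option String) (PySem.Dict String Int))
    (p : Option String × String) :
    pvStepA g p =
      (if g.contains p.1 then g else g.insert p.1 PySem.Dict.empty).insert p.1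
        ((if ((if g.contains p.1 then g else g.insert p.1 PySem.Dict.empty).getD p.1 PySem.Dict.empty).contains p.2
          then (if g.contains p.1 then g else g.insert p.1 PySem.Dict.empty).getD p.1 PySem.Dict.empty
          else ((if g.contains p.1 then g else g.insert p.1 PySem.Dict.empty).getD p.1 PySem.Dict.empty).insert p.2 (0 : Int)).insert p.2
          ((if ((if g.contains p.1 then g else g.insert p.1 PySem.Dict.empty).getD p.1 PySem.Dict.empty).contains p.2
            then (if g.contains p.1 then g else g.insert p.1 PySem.Dict.empty).getD p.1 PySem.Dict.empty
            else ((if g.contains p.1 then g else g.insert p.1 PySem.Dict.empty).getD p.1 PySem.Dict.empty).insert p.2 (0 : Int)).getD p.2 0 + 1)) := by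
  unfold pvStepA
  by_cases h : ((if g.contains p.1 then g else g.insert p.1 PySem.Dict.empty).getD p.1 PySem.Dict.empty).contains p.2
  · simp only [h, if_true]
  · simp only [h, Bool.false_eq_true, if_false, PySem.Dict.getD_insert_self,
      PySem.Dict.insert_insert_self]

-- membership in the grouped dict
theorem pvGrouped_contains_iff (ps : List (Option String × String)) (a : Option String) :
    (pvGrouped ps).contains a = true ↔ a ∈ ps.map (·.1) := by
  unfold pvGrouped
  rw [PySem.Dict.contains_mk, List.any_map]
  simp only [Function.comp_def, beq_iff_eq, List.any_eq_true]
  constructor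
  · rintro ⟨a', ha', rfl⟩; exact (PySem.Set.mem_ofList _ _).1 ha'
  · intro hm; exact ⟨a, (PySem.Set.mem_ofList _ _).2 hm, rfl⟩

theorem pvGrouped_keys_nodup (ps : List (Option String × String)) :
    (pvGrouped ps).keys.Nodup := by
  unfold pvGrouped
  rw [PySem.Dict.keys_mk, List.map_map]
  simp [Function.comp_def]

-- A's fold in closed form
theorem pvA_grouped (ps : List (Option String × String)) :
    ps.foldl pvStepA PySem.Dict.empty = pvGrouped ps := by
  induction ps using List.reverseRecOn with
  | nil => rfl
  | append_singleton ps p ih =>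
      rcases p with ⟨a, b⟩
      rw [List.foldl_append, List.foldl_cons, List.foldl_nil, ih, pvStepA_eq]
      by_cases hm : a ∈ ps.map (·.1)
      · have hc : (pvGrouped ps).contains a = true := (pvGrouped_contains_iff ps a).2 hm
        have hmemit : (a, PySem.Dict.counter ((ps.filter (fun q => q.1 == a)).map (·.2)))
            ∈ (pvGrouped ps).items := by
          unfold pvGrouped
          exact List.mem_map_of_mem ((PySem.Set.mem_ofList _ _).2 hm)
        have hgetD : (pvGrouped ps).getD a PySem.Dict.empty
            = PySem.Dict.counter ((ps.filter (fun q => q.1 == a)).map (·.2)) :=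
          PySem.Dict.getD_of_mem_items _ hmemit (pvGrouped_keys_nodup ps) _
        simp only [hc, if_true, hgetD, pvEnsureBump]
        apply PySem.Dict.ext
        rw [PySem.Dict.items_insert_of_contains _ _ hc]
        unfold pvGrouped
        simp only [List.map_append, List.map_cons, List.map_nil,
          PySem.Set.ofList_append_singleton, PySem.Set.add_of_mem ((PySem.Set.mem_ofList _ _).2 hm),
          List.map_map]
        apply List.map_congr_left
        intro a' _
        simp only [Function.comp_def]
        by_cases h' : a' = a
        · subst h'
          simp only [beq_self_eq_true, if_true, List.filter_append, List.filter_cons,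
            List.filter_nil, List.map_append]
          simp
        · have : (a' == a) = false := by simpa using h'
          simp only [this, Bool.false_eq_true, if_false, List.filter_append, List.filter_cons,
            List.filter_nil]
          have h2 : ((a, b).1 == a') = false := by simpa using fun h => h' h.symm
          simp [h2]
      · have hc : (pvGrouped ps).contains a = false := by
          rw [← Bool.not_eq_true, pvGrouped_contains_iff]; exact hm
        have hnK : a ∉ PySem.Set.ofList (ps.map (·.1)) := fun h =>
          hm ((PySem.Set.mem_ofList _ _).1 h)
        simp only [hc, Bool.false_eq_true, if_false, PySem.Dict.getD_insert_self,
          PySem.Dict.contains_empty, PySem.Dict.insert_insert_self]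
        apply PySem.Dict.ext
        rw [PySem.Dict.items_insert_of_not_contains _ _ hc]
        unfold pvGrouped
        simp only [List.map_append, List.map_cons, List.map_nil,
          PySem.Set.ofList_append_singleton, PySem.Set.add_of_not_mem hnK, List.map_append]
        have hfilt : ps.filter (fun q => q.1 == a) = [] := by
          rw [List.filter_eq_nil_iff]
          intro q hq
          simp only [beq_iff_eq]
          exact fun h => hm (h ▸ List.mem_map_of_mem hq)
        congr 1
        · apply List.map_congr_left
          intro a' ha'
          have h' : a' ≠ a := fun h => hnK (h ▸ ha')
          have : (a' == a) = false := by simpa using h'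
          simp only [List.filter_append, List.filter_cons, List.filter_nil]
          have h2 : ((a, b).1 == a') = false := by simpa using fun h => h' h.symm
          simp [h2]
        · simp only [List.filter_append, hfilt, List.filter_cons, List.filter_nil,
            beq_self_eq_true, if_true]
          simp [PySem.Dict.counter, PySem.Dict.modify, PySem.Dict.empty]
          rfl

-- counter, written as B writes it: dedup the elements, count each
theorem pvCounter_as_dedup_count (S : List String) :
    PySem.Dict.mk ((PySem.Set.ofList S).map (fun b => (b, (PySem.List.count S b : Int))))
      = PySem.Dict.counter S := by
  apply PySem.Dict.ext
  rw [PySem.Dict.items_counter]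
  simp only [PySem.List.count_eq]

-- A's whole loop over all lists
theorem pvA_total (ls : List (List (String × String))) :
    ∀ g, ls.foldl (fun g chords =>
      (chords.foldl (fun st chord => (pvStepA st.1 (st.2, chord.2), some chord.2))
        (g, (none : Option String))).1) g
      = (ls.flatMap (pvTrans none)).foldl pvStepA g := by
  induction ls with
  | nil => intro g; rfl
  | cons chords ls ih =>
      intro g
      rw [List.foldl_cons, pvA_flatten, List.flatMap_cons, List.foldl_append]
      exact ih _

-- ===== VERDICT (by name: the statement is the Claim_ definition above) =====
theorem build_chord_graph_spec : Claim_equal_build_chord_graph := by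
  intro ls _
  unfold Spec_build_chord_graph build_chord_graph build_chord_graph_alt
  simp only
  rw [pvA_total, pvA_grouped]
  have htrans : ls.flatMap (fun chords =>
      ((none :: (chords.map (fun c => c.2)).map some).zip (chords.map (fun c => c.2))))
      = ls.flatMap (pvTrans none) := by
    exact congrArg (fun f => List.flatMap f ls) (funext (fun c => pvB_zip c none))
  rw [htrans]
  unfold pvGrouped
  congr 1
  simp only [PySem.List.dedup_eq_ofList]
  apply List.map_congr_left
  intro a _
  rw [pvCounter_as_dedup_count]
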